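-- pv_equiv track=rewrite | github.com/Tomo777xxx/fx-report-test | app.py | _majority_label
-- ===== SOURCE A (Python) =====
-- def _majority_label(signs: list[int | None]) -> int:
--     vals = [x for x in signs if x is not None]
--     if not vals:
--         return 0
--     pos = sum(1 for x in vals if x > 0)
--     neg = sum(1 for x in vals if x < 0)
--     if pos > neg:
--         return 1
--     if neg > pos:
--         return -1
--     return 0
-- ===== SOURCE B (Python) =====
-- def _majority_label(signs: list[int | None]) -> int:
--     # Sort the sign units, then cancel negatives against positives from the
--     # two ends of the sorted list; whatever survives decides the label.
--     units = sorted((x > 0) - (x < 0) for x in signs if x is not None)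
--     while units and units[0] < 0 and units[-1] > 0:
--         units.pop()
--         units.pop(0)
--     if not units:
--         return 0
--     if units[0] < 0:
--         return -1
--     if units[-1] > 0:
--         return 1
--     return 0
-- ===== Notes on version B (the rewrite author's own statement) =====
-- stated objective: alternative
-- what changed: Replaces A's filter-then-two-counts comparison with a sort-and-cancel algorithm: map entries to sign units, sort them, repeatedly cancel a leading negative against a trailing positive from the two ends, and label by whatever end survives; correct because each cancellation removes exactly one positive and one negative, so the surviving segment has the majority sign.
import Mathlib
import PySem

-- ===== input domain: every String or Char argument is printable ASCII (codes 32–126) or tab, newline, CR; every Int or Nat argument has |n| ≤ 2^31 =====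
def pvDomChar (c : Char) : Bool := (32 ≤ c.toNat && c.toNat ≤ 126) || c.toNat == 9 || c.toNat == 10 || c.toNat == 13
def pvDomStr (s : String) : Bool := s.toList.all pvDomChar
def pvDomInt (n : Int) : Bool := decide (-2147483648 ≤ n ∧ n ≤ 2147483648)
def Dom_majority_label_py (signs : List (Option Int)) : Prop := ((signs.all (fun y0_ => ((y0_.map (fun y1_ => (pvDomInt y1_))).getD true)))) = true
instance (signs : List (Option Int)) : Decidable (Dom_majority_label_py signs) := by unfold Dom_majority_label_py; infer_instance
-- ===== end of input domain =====

-- B replaces A's filter-plus-two-counts comparison with a different algorithm: sort the sign units, cancel negatives against positives from the two ends, label by what survives (alternative; not faster).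


-- ===== PORT A =====
-- vals = [x for x in signs if x is not None]; if not vals: return 0;
-- pos/neg are two separate counting passes; then the comparison chain.
def majority_label_py (signs : List (Option Int)) : Int :=
  let vals : List Int := (signs.filter (fun x => x ≠ none)).filterMap id
  if vals = [] then 0
  else
    let pos : Int := (vals.filter (fun x => x > 0)).foldl (fun acc _ => acc + 1) 0
    let neg : Int := (vals.filter (fun x => x < 0)).foldl (fun acc _ => acc + 1) 0
    if pos > neg then 1
    else if neg > pos then -1
    else 0

-- ===== PORT B =====
-- (x > 0) - (x < 0)
def pvUnit (x : Int) : Int := (if x > 0 then (1:Int) else 0) - (if x < 0 then 1 else 0)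

-- while units and units[0] < 0 and units[-1] > 0: units.pop(); units.pop(0)
def pvCancel : List Int → List Int
  | [] => []
  | x :: xs =>
    if x < 0 ∧ xs.getLastD x > 0 then pvCancel ((x :: xs).dropLast.tail)
    else x :: xs
termination_by l => l.length
decreasing_by simp [List.length_dropLast]

-- the final checks: if not units: 0; if units[0] < 0: -1; if units[-1] > 0: 1; else 0
def pvPost (r : List Int) : Int :=
  match r with
  | [] => 0
  | x :: xs =>
    if x < 0 then -1
    else if xs.getLastD x > 0 then 1
    else 0

-- units = sorted(unit x for x in signs if x is not None); cancel; then the end checks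
def majority_label_py_alt (signs : List (Option Int)) : Int :=
  let units : List Int :=
    PySem.List.sorted (((signs.filter (fun x => x ≠ none)).filterMap id).map pvUnit) (fun x => x) false
  pvPost (pvCancel units)

-- ===== PRECONDITION & SPEC =====
def Spec_majority_label_py (signs : List (Option Int)) (out : Int) : Prop := out = majority_label_py_alt signs
instance (signs : List (Option Int)) (out : Int) : Decidable (Spec_majority_label_py signs out) := by unfold Spec_majority_label_py; infer_instance

-- ===== CLAIM (what is proved, stated in full; the proofs are below) =====
def Claim_equal_majority_label_py : Prop := ∀ (signs : List (Option Int)), Dom_majority_label_py signs → Spec_majority_label_py signs (majority_label_py signs)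

-- ===== LEMMAS AND PROOFS =====

-- counting fold is list length
theorem pv_count_fold (l : List Int) : l.foldl (fun acc _ => acc + (1:Int)) 0 = l.length := by
  have h : ∀ (a : Int), l.foldl (fun acc _ => acc + (1:Int)) a = a + l.length := by
    induction l with
    | nil => intro a; simp
    | cons x xs ih => intro a; simp [List.foldl, ih]; ring
  simpa using h 0

-- the canonical sorted form of the unit list
def pvCanon (a b c : Nat) : List Int :=
  List.replicate a (-1) ++ List.replicate b 0 ++ List.replicate c 1

-- unfolding equation for pvCancel on a nonempty list
theorem pvCancel_cons (x : Int) (xs : List Int) :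
    pvCancel (x :: xs) =
      if x < 0 ∧ xs.getLastD x > 0 then pvCancel ((x :: xs).dropLast.tail)
      else x :: xs := by
  rw [pvCancel]

-- moving a 0 from the front into the middle block is a permutation
theorem pv_perm_mid (a b c : Nat) :
    ((0:Int) :: pvCanon a b c).Perm (pvCanon a (b+1) c) := by
  unfold pvCanon
  rw [List.replicate_succ]
  exact List.Perm.append_right _
    (List.perm_middle (a := (0:Int)) (l₁ := List.replicate a (-1))
      (l₂ := List.replicate b 0)).symm

-- the unit list is a permutation of the canonical form built from the three counts
theorem pv_perm_canon (l : List Int) :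
    (l.map pvUnit).Perm
      (pvCanon (l.filter (fun x => x < 0)).length
               (l.filter (fun x => x = 0)).length
               (l.filter (fun x => x > 0)).length) := by
  induction l with
  | nil => simp [pvCanon]
  | cons v t ih =>
    by_cases h1 : v < 0
    · have h2 : ¬ v > 0 := by omega
      have h3 : ¬ v = 0 := by omega
      simpa [pvCanon, List.filter, h1, h2, h3, pvUnit, List.replicate_succ] using ih.cons (-1)
    · by_cases h2 : v > 0
      · have h3 : ¬ v = 0 := by omega
        have hu : pvUnit v = 1 := by simp [pvUnit, h1, h2]
        simp only [List.map, List.filter, h1, h2, h3, decide_true, decide_false, hu,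
          List.length_cons]
        refine (ih.cons 1).trans ?_
        rw [pvCanon]
        exact List.perm_middle.symm
      · have h3 : v = 0 := by omega
        subst h3
        have hu : pvUnit 0 = 0 := by simp [pvUnit]
        simp only [List.map, List.filter, decide_true, decide_false, hu, List.length_cons,
          show ((0:Int) < 0) = False from by simp]
        exact (ih.cons 0).trans (pv_perm_mid _ _ _)

-- the canonical form is weakly increasing
theorem pv_canon_pairwise (a b c : Nat) : (pvCanon a b c).Pairwise (· ≤ ·) := by
  unfold pvCanon
  refine List.pairwise_append.2 ⟨List.pairwise_append.2 ⟨List.pairwise_replicate.2 (Or.inr le_rfl),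
    List.pairwise_replicate.2 (Or.inr le_rfl), ?_⟩, List.pairwise_replicate.2 (Or.inr le_rfl), ?_⟩
  · intro x hx y hy
    rw [List.eq_of_mem_replicate hx, List.eq_of_mem_replicate hy]
    norm_num
  · intro x hx y hy
    rw [List.eq_of_mem_replicate hy]
    rcases List.mem_append.1 hx with hx | hx <;> rw [List.eq_of_mem_replicate hx] <;> norm_num

-- getLastD of a replicate, and of a list followed by a replicate
theorem pv_gl_rep (n : Nat) (x d : Int) :
    (List.replicate n x).getLastD d = if n = 0 then d else x := by
  cases n with
  | zero => simp
  | succ m => rw [List.replicate_succ' (n := m), List.getLastD_concat]; simp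

theorem pv_gl_app (l : List Int) (n : Nat) (x d : Int) :
    (l ++ List.replicate n x).getLastD d = if n = 0 then l.getLastD d else x := by
  cases n with
  | zero => simp
  | succ m => rw [List.replicate_succ' (n := m), ← List.append_assoc, List.getLastD_concat]; simp

theorem pv_canon_gl (a b c : Nat) (d : Int) :
    (pvCanon a b c).getLastD d =
      if c = 0 then (if b = 0 then (if a = 0 then d else -1) else 0) else 1 := by
  unfold pvCanon
  rw [pv_gl_app, pv_gl_app, pv_gl_rep]

-- shape lemmas for the canonical form
theorem pv_canon_001 (c : Nat) : pvCanon 0 0 (c+1) = 1 :: List.replicate c 1 := by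
  simp [pvCanon, List.replicate_succ]

theorem pv_canon_0b (b c : Nat) :
    pvCanon 0 (b+1) c = 0 :: (List.replicate b 0 ++ List.replicate c 1) := by
  simp [pvCanon, List.replicate_succ]

theorem pv_canon_succ (a b c : Nat) : pvCanon (a+1) b c = -1 :: pvCanon a b c := by
  simp [pvCanon, List.replicate_succ]

theorem pvCancel_nil : pvCancel [] = [] := by rw [pvCancel]

theorem pv_drop (a b c : Nat) :
    ((-1:Int) :: pvCanon a b (c+1)).dropLast.tail = pvCanon a b c := by
  have h : (-1:Int) :: pvCanon a b (c+1) =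
      ((-1:Int) :: (List.replicate a (-1) ++ List.replicate b 0 ++ List.replicate c 1)) ++ [1] := by
    simp [pvCanon, List.replicate_succ' (n := c), List.append_assoc]
  rw [h, List.dropLast_concat]
  rfl

-- cancel on the canonical form yields the sign comparison
theorem pv_cancel_canon (a : Nat) : ∀ (c b : Nat),
    pvPost (pvCancel (pvCanon a b c))
    = if a < c then (1:Int) else if c < a then -1 else 0 := by
  induction a with
  | zero =>
    intro c b
    cases b with
    | zero =>
      cases c with
      | zero =>
        rw [show pvCanon 0 0 0 = [] from by simp [pvCanon], pvCancel_nil]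
        simp [pvPost]
      | succ c' =>
        rw [pv_canon_001, pvCancel_cons,
          if_neg (fun h => absurd h.1 (by norm_num))]
        simp only [pvPost]
        rw [pv_gl_rep]
        split_ifs <;> omega
    | succ b' =>
      rw [pv_canon_0b, pvCancel_cons,
        if_neg (fun h => absurd h.1 (by norm_num))]
      simp only [pvPost]
      rw [pv_gl_app, pv_gl_rep]
      split_ifs <;> omega
  | succ a' ih =>
    intro c b
    rw [pv_canon_succ, pvCancel_cons]
    cases c with
    | zero =>
      rw [if_neg (fun h => by
        have h2 := h.2
        rw [pv_canon_gl] at h2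
        split_ifs at h2 <;> omega)]
      simp only [pvPost]
      split_ifs <;> omega
    | succ c' =>
      rw [if_pos ⟨by norm_num, by rw [pv_canon_gl]; norm_num⟩]
      rw [pv_drop, ih c' b]
      by_cases h : a' < c'
      · rw [if_pos h, if_pos (by omega)]
      · by_cases h2 : c' < a'
        · rw [if_neg h, if_pos h2, if_neg (by omega), if_pos (by omega)]
        · rw [if_neg h, if_neg h2, if_neg (by omega), if_neg (by omega)]

-- the sorted unit list IS the canonical form
theorem pv_sorted_canon (l : List Int) :
    PySem.List.sorted (l.map pvUnit) (fun x => x) false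
    = pvCanon (l.filter (fun x => x < 0)).length
              (l.filter (fun x => x = 0)).length
              (l.filter (fun x => x > 0)).length := by
  exact PySem.List.sorted_id_eq_of_perm_of_pairwise _ _
    (pv_perm_canon l).symm (pv_canon_pairwise _ _ _)

-- ===== VERDICT (by name: the statement is the Claim_ definition above) =====
theorem majority_label_py_spec : Claim_equal_majority_label_py := by
  unfold Claim_equal_majority_label_py
  intro signs _
  unfold Spec_majority_label_py majority_label_py majority_label_py_alt
  simp only [pv_count_fold, pv_sorted_canon, pv_cancel_canon]
  set vals : List Int := (signs.filter (fun x => x ≠ none)).filterMap id with hv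
  set a := (vals.filter (fun x => x < 0)).length with ha'
  set c := (vals.filter (fun x => x > 0)).length with hc'
  by_cases hnil : vals = []
  · have ha : a = 0 := by simp [ha', hnil]
    have hc : c = 0 := by simp [hc', hnil]
    simp [hnil, ha, hc]
  · simp only [hnil, if_false]
    by_cases h : a < c
    · rw [if_pos (by exact_mod_cast h), if_pos h]
    · by_cases h2 : c < a
      · rw [if_neg (by exact_mod_cast h), if_pos (by exact_mod_cast h2), if_neg h, if_pos h2]
      · rw [if_neg (by exact_mod_cast h), if_neg (by exact_mod_cast h2), if_neg h, if_neg h2]
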